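-- pv_equiv track=rewrite | github.com/icefoxtail/AP------ | replace_tf_to_frac.py | convert_tf_to_frac
-- ===== SOURCE A (Python) =====
-- def parse_brace_group(s: str, start_idx: int):
--     """
--     s[start_idx] must be '{'
--     Returns: (group_text_including_braces, next_index_after_group)
--     Supports nested braces.
--     """
--     if start_idx >= len(s) or s[start_idx] != "{":
--         return None, start_idx
--
--     depth = 0
--     i = start_idx
--     while i < len(s):
--         ch = s[i]
--         if ch == "{":
--             depth += 1
--         elif ch == "}":
--             depth -= 1
--             if depth == 0:
--                 return s[start_idx:i + 1], i + 1
--         i += 1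
--
--     return None, start_idx
--
-- def convert_tf_to_frac(text: str):
--     """
--     Converts only exact macro pattern:
--       \\tf{...}{...}
--       \\tf   { ... }   { ... }
--     Nested braces are supported.
--
--     Does NOT touch:
--       - plain text
--       - malformed patterns
--       - other macros
--     """
--     i = 0
--     out = []
--     replacements = 0
--     warnings = []
--
--     while i < len(text):
--         if text.startswith("\\tf", i):
--             macro_start = i
--             j = i + 3  # after \tf
--
--             # Do not convert things like \tfoo
--             if j < len(text) and (text[j].isalnum() or text[j] == "_"):
--                 out.append(text[i])
--                 i += 1
--                 continue
--
--             # allow whitespace between \tf and first brace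
--             while j < len(text) and text[j].isspace():
--                 j += 1
--
--             if j >= len(text) or text[j] != "{":
--                 # malformed or legacy odd case: leave untouched
--                 out.append(text[i])
--                 i += 1
--                 continue
--
--             group1, next1 = parse_brace_group(text, j)
--             if group1 is None:
--                 warnings.append(f"Unclosed first brace near index {macro_start}")
--                 out.append(text[i])
--                 i += 1
--                 continue
--
--             k = next1
--             while k < len(text) and text[k].isspace():
--                 k += 1
--
--             if k >= len(text) or text[k] != "{":
--                 warnings.append(f"Missing second brace group near index {macro_start}")
--                 out.append(text[i])
--                 i += 1
--                 continue
--
--             group2, next2 = parse_brace_group(text, k)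
--             if group2 is None:
--                 warnings.append(f"Unclosed second brace near index {macro_start}")
--                 out.append(text[i])
--                 i += 1
--                 continue
--
--             # Safe conversion
--             out.append("\\frac")
--             out.append(group1)
--             out.append(group2)
--             replacements += 1
--             i = next2
--             continue
--
--         out.append(text[i])
--         i += 1
--
--     new_text = "".join(out)
--     residual = new_text.count("\\tf")
--     return new_text, replacements, residual, warnings
-- ===== SOURCE B (Python) =====
-- def convert_tf_to_frac(text: str):
--     n = len(text)
--     # one pass: matching '}' index for every matched '{', -1 otherwise
--     match = [-1] * n
--     stack = []
--     for idx, ch in enumerate(text):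
--         if ch == "{":
--             stack.append(idx)
--         elif ch == "}" and stack:
--             match[stack.pop()] = idx
--
--     out = []
--     replacements = 0
--     warnings = []
--     i = 0
--     while i < n:
--         if text.startswith("\\tf", i):
--             j = i + 3
--             if j < n and (text[j].isalnum() or text[j] == "_"):
--                 out.append(text[i])
--                 i += 1
--                 continue
--             while j < n and text[j].isspace():
--                 j += 1
--             if j >= n or text[j] != "{":
--                 out.append(text[i])
--                 i += 1
--                 continue
--             e1 = match[j]
--             if e1 < 0:
--                 warnings.append(f"Unclosed first brace near index {i}")
--                 out.append(text[i])
--                 i += 1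
--                 continue
--             k = e1 + 1
--             while k < n and text[k].isspace():
--                 k += 1
--             if k >= n or text[k] != "{":
--                 warnings.append(f"Missing second brace group near index {i}")
--                 out.append(text[i])
--                 i += 1
--                 continue
--             e2 = match[k]
--             if e2 < 0:
--                 warnings.append(f"Unclosed second brace near index {i}")
--                 out.append(text[i])
--                 i += 1
--                 continue
--             out.append("\\frac")
--             out.append(text[j:e1 + 1])
--             out.append(text[k:e2 + 1])
--             replacements += 1
--             i = e2 + 1
--             continue
--         out.append(text[i])
--         i += 1
--
--     new_text = "".join(out)
--     return new_text, replacements, new_text.count("\\tf"), warnings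
-- ===== Notes on version B (the rewrite author's own statement) =====
-- stated objective: alternative
-- what changed: A re-scans the text from each tf-macro with a nested depth-counting brace parser, quadratic in the worst case; B precomputes the matching closing brace of every opening brace in one stack pass over the text and then handles each macro with constant-time table lookups.
import Mathlib
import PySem

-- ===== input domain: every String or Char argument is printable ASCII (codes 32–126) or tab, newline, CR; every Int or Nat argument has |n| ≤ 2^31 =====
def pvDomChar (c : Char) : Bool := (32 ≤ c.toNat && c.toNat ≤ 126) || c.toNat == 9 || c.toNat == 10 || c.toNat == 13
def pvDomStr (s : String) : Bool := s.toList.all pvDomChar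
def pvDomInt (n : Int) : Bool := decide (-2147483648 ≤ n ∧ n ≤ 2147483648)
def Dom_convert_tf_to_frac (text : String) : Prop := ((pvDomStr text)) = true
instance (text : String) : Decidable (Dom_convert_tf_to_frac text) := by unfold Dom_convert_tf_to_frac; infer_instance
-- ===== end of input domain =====

-- B replaces A's per-macro rescanning brace parser by a single stack pass that
-- precomputes each opening brace's matching closer, read back by table lookup
-- (objective: alternative algorithm; intended asymptotically better on adversarial
-- macro-heavy texts, measured about 1.2x on the generated inputs, so not claimed faster).

-- the pattern "\tf" and the replacement "\frac", shared literals
def pvTf : List Char := ['\\', 't', 'f']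
def pvFrac : List Char := ['\\', 'f', 'r', 'a', 'c']

-- the whitespace-skipping while loop, identical in A and B
def skipWS (s : List Char) (j : Nat) : Nat :=
  if h : j < s.length then
    if PySem.Chars.isspace s[j] then skipWS s (j + 1) else j
  else j
termination_by s.length - j

-- ===== PORT A =====
-- the scanning while loop of parse_brace_group (depth is a Python int)
def pbgLoop (s : List Char) (start i : Nat) (depth : Int) : Option (List Char) × Nat :=
  if h : i < s.length then
    if s[i] = '{' then pbgLoop s start (i + 1) (depth + 1)
    else if s[i] = '}' then
      if depth - 1 = 0 then
        (some (PySem.List.slice s (some (start : Int)) (some ((i : Int) + 1))), i + 1)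
      else pbgLoop s start (i + 1) (depth - 1)
    else pbgLoop s start (i + 1) depth
  else (none, start)
termination_by s.length - i

def parseBraceGroup (s : List Char) (start : Nat) : Option (List Char) × Nat :=
  if start ≥ s.length ∨ ¬ s.getD start ' ' = '{' then (none, start)
  else pbgLoop s start start 0

-- A's main while loop; fuel ≥ len(text) suffices since i strictly increases
def convGoA (s : List Char) (fuel i : Nat) (out : List (List Char)) (reps : Int)
    (warns : List String) : List (List Char) × Int × List String :=
  match fuel with
  | 0 => (out, reps, warns)
  | fuel + 1 =>
    if i < s.length then
      if PySem.Chars.startswith (s.drop i) pvTf then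
        let j := i + 3
        if j < s.length ∧ (PySem.Chars.isalnum (s.getD j ' ') = true ∨ s.getD j ' ' = '_') then
          convGoA s fuel (i + 1) (out ++ [[s.getD i ' ']]) reps warns
        else
          let j' := skipWS s j
          if j' ≥ s.length ∨ ¬ s.getD j' ' ' = '{' then
            convGoA s fuel (i + 1) (out ++ [[s.getD i ' ']]) reps warns
          else
            match parseBraceGroup s j' with
            | (none, _) =>
              convGoA s fuel (i + 1) (out ++ [[s.getD i ' ']]) reps
                (warns ++ ["Unclosed first brace near index " ++ PySem.Int.toStr (i : Int)])
            | (some g1, n1) =>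
              let k := skipWS s n1
              if k ≥ s.length ∨ ¬ s.getD k ' ' = '{' then
                convGoA s fuel (i + 1) (out ++ [[s.getD i ' ']]) reps
                  (warns ++ ["Missing second brace group near index " ++ PySem.Int.toStr (i : Int)])
              else
                match parseBraceGroup s k with
                | (none, _) =>
                  convGoA s fuel (i + 1) (out ++ [[s.getD i ' ']]) reps
                    (warns ++ ["Unclosed second brace near index " ++ PySem.Int.toStr (i : Int)])
                | (some g2, n2) =>
                  convGoA s fuel n2 (out ++ [pvFrac, g1, g2]) (reps + 1) warns
      else
        convGoA s fuel (i + 1) (out ++ [[s.getD i ' ']]) reps warns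
    else (out, reps, warns)

def convert_tf_to_frac (text : String) : String × Int × Int × List String :=
  let s := text.toList
  let r := convGoA s s.length 0 [] 0 []
  let new := PySem.Chars.join [] r.1
  (String.ofList new, r.2.1, (PySem.Chars.count new pvTf : Int), r.2.2)

-- ===== PORT B =====
-- the single stack pass over enumerate(text): state (stack, match)
def bmGo : List Char → Nat → List Nat → List Int → List Nat × List Int
  | [], _, st, m => (st, m)
  | c :: l, idx, st, m =>
    if c = '{' then bmGo l (idx + 1) (idx :: st) m
    else if c = '}' then
      match st with
      | [] => bmGo l (idx + 1) [] m
      | j :: rest => bmGo l (idx + 1) rest (m.set j idx)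
    else bmGo l (idx + 1) st m

def buildMatch (s : List Char) : List Int :=
  (bmGo s 0 [] (List.replicate s.length (-1))).2

-- B's main while loop: brace groups come from the precomputed table
def convGoB (s : List Char) (m : List Int) (fuel i : Nat) (out : List (List Char)) (reps : Int)
    (warns : List String) : List (List Char) × Int × List String :=
  match fuel with
  | 0 => (out, reps, warns)
  | fuel + 1 =>
    if i < s.length then
      if PySem.Chars.startswith (s.drop i) pvTf then
        let j := i + 3
        if j < s.length ∧ (PySem.Chars.isalnum (s.getD j ' ') = true ∨ s.getD j ' ' = '_') then
          convGoB s m fuel (i + 1) (out ++ [[s.getD i ' ']]) reps warns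
        else
          let j' := skipWS s j
          if j' ≥ s.length ∨ ¬ s.getD j' ' ' = '{' then
            convGoB s m fuel (i + 1) (out ++ [[s.getD i ' ']]) reps warns
          else
            let e1 := m.getD j' (-1)
            if e1 < 0 then
              convGoB s m fuel (i + 1) (out ++ [[s.getD i ' ']]) reps
                (warns ++ ["Unclosed first brace near index " ++ PySem.Int.toStr (i : Int)])
            else
              let k := skipWS s (e1 + 1).toNat
              if k ≥ s.length ∨ ¬ s.getD k ' ' = '{' then
                convGoB s m fuel (i + 1) (out ++ [[s.getD i ' ']]) reps
                  (warns ++ ["Missing second brace group near index " ++ PySem.Int.toStr (i : Int)])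
              else
                let e2 := m.getD k (-1)
                if e2 < 0 then
                  convGoB s m fuel (i + 1) (out ++ [[s.getD i ' ']]) reps
                    (warns ++ ["Unclosed second brace near index " ++ PySem.Int.toStr (i : Int)])
                else
                  convGoB s m fuel (e2 + 1).toNat
                    (out ++ [pvFrac,
                             PySem.List.slice s (some (j' : Int)) (some (e1 + 1)),
                             PySem.List.slice s (some (k : Int)) (some (e2 + 1))])
                    (reps + 1) warns
      else
        convGoB s m fuel (i + 1) (out ++ [[s.getD i ' ']]) reps warns
    else (out, reps, warns)

def convert_tf_to_frac_alt (text : String) : String × Int × Int × List String :=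
  let s := text.toList
  let r := convGoB s (buildMatch s) s.length 0 [] 0 []
  let new := PySem.Chars.join [] r.1
  (String.ofList new, r.2.1, (PySem.Chars.count new pvTf : Int), r.2.2)

-- ===== PRECONDITION & SPEC =====
def Spec_convert_tf_to_frac (text : String) (out : String × Int × Int × List String) : Prop := out = convert_tf_to_frac_alt text
instance (text : String) (out : String × Int × Int × List String) : Decidable (Spec_convert_tf_to_frac text out) := by unfold Spec_convert_tf_to_frac; infer_instance

-- ===== CLAIM (what is proved, stated in full; the proofs are below) =====
def Claim_equal_convert_tf_to_frac : Prop := ∀ (text : String), Dom_convert_tf_to_frac text → Spec_convert_tf_to_frac text (convert_tf_to_frac text)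

-- ===== LEMMAS AND PROOFS =====

-- the common closing-offset spec relating A's rescan and B's stack pass
def closeRel : List Char → Nat → Option Nat
  | [], _ => none
  | c :: l, d =>
    if c = '{' then (closeRel l (d + 1)).map (· + 1)
    else if c = '}' then
      (if d = 1 then some 0 else (closeRel l (d - 1)).map (· + 1))
    else (closeRel l d).map (· + 1)

lemma bmGo_cons (c : Char) (l : List Char) (i : Nat) (st : List Nat) (m : List Int) :
    bmGo (c :: l) i st m =
      (if c = '{' then bmGo l (i + 1) (i :: st) m
       else if c = '}' then
         (match st with
          | [] => bmGo l (i + 1) [] m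
          | j :: rest => bmGo l (i + 1) rest (m.set j i))
       else bmGo l (i + 1) st m) := rfl

lemma bmGo_snd_getD_of_notin (d : Int) :
    ∀ (l : List Char) (i : Nat) (st : List Nat) (m : List Int) (j : Nat),
    j ∉ st → j < i → ((bmGo l i st m).2).getD j d = m.getD j d := by
  intro l
  induction l with
  | nil => intro i st m j _ _; rfl
  | cons c l ih =>
    intro i st m j hnot hlt
    unfold bmGo
    split_ifs with h1 h2
    · exact (ih (i+1) (i :: st) m j (by simp [hnot]; omega) (by omega))
    · cases st with
      | nil => exact ih (i+1) [] m j (by simp) (by omega)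
      | cons jj rest =>
        rw [ih (i+1) rest _ j (by intro hm; exact hnot (List.mem_cons_of_mem _ hm)) (by omega)]
        have hne : jj ≠ j := by intro he; exact hnot (he ▸ List.mem_cons_self)
        simp [List.getD, List.getElem?_set_ne hne]
    · exact ih (i+1) st m j hnot (by omega)

lemma bmGo_snd_getD_of_ge (d : Int) :
    ∀ (l : List Char) (i : Nat) (st : List Nat) (m : List Int) (j : Nat),
    (∀ x ∈ st, x < i) → i + l.length ≤ j → ((bmGo l i st m).2).getD j d = m.getD j d := by
  intro l
  induction l with
  | nil => intro i st m j _ _; rfl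
  | cons c l ih =>
    intro i st m j hst hle
    simp only [List.length_cons] at hle
    unfold bmGo
    split_ifs with h1 h2
    · exact ih (i+1) (i :: st) m j (by intro x hx; rcases List.mem_cons.1 hx with h|h; omega; exact lt_trans (hst x h) (by omega)) (by omega)
    · cases st with
      | nil => exact ih (i+1) [] m j (by simp) (by omega)
      | cons jj rest =>
        rw [ih (i+1) rest _ j (by intro x hx; exact lt_trans (hst x (List.mem_cons_of_mem _ hx)) (by omega)) (by omega)]
        have hne : jj ≠ j := by have := hst jj List.mem_cons_self; omega
        simp [List.getD, List.getElem?_set_ne hne]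
    · exact ih (i+1) st m j (by intro x hx; exact lt_trans (hst x hx) (by omega)) (by omega)

lemma bmGo_append :
    ∀ (l1 l2 : List Char) (i : Nat) (st : List Nat) (m : List Int),
    bmGo (l1 ++ l2) i st m = bmGo l2 (i + l1.length) (bmGo l1 i st m).1 (bmGo l1 i st m).2 := by
  intro l1
  induction l1 with
  | nil => intro l2 i st m; simp [bmGo]
  | cons c l ih =>
    intro l2 i st m
    simp only [List.cons_append, List.length_cons, bmGo_cons]
    rw [show i + (l.length + 1) = (i + 1) + l.length by omega]
    split_ifs with h1 h2
    · exact ih l2 (i+1) (i :: st) m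
    · cases st with
      | nil => exact ih l2 (i+1) [] m
      | cons jj rest => exact ih l2 (i+1) rest (m.set jj i)
    · exact ih l2 (i+1) st m

lemma bmGo_fst_inv :
    ∀ (l : List Char) (i : Nat) (st : List Nat) (m : List Int),
    (∀ x ∈ st, x < i) → st.Pairwise (· > ·) →
    (∀ x ∈ (bmGo l i st m).1, x < i + l.length) ∧ (bmGo l i st m).1.Pairwise (· > ·) := by
  intro l
  induction l with
  | nil => intro i st m h1 h2; simpa [bmGo] using ⟨h1, h2⟩
  | cons c l ih =>
    intro i st m hst hpw
    simp only [List.length_cons]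
    unfold bmGo
    split_ifs with h1 h2
    · have := ih (i+1) (i :: st) m (by intro x hx; rcases List.mem_cons.1 hx with h|h; omega; exact lt_trans (hst x h) (by omega))
        (List.pairwise_cons.2 ⟨fun x hx => hst x hx, hpw⟩)
      constructor
      · intro x hx; have := this.1 x hx; omega
      · exact this.2
    · cases st with
      | nil =>
        have := ih (i+1) [] m (by simp) (by simp)
        exact ⟨fun x hx => by have := this.1 x hx; omega, this.2⟩
      | cons jj rest =>
        have := ih (i+1) rest (m.set jj i)
          (by intro x hx; exact lt_trans (hst x (List.mem_cons_of_mem _ hx)) (by omega))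
          (List.Pairwise.of_cons hpw)
        exact ⟨fun x hx => by have := this.1 x hx; omega, this.2⟩
    · have := ih (i+1) st m (by intro x hx; exact lt_trans (hst x hx) (by omega)) hpw
      exact ⟨fun x hx => by have := this.1 x hx; omega, this.2⟩

lemma bmGo_snd_length :
    ∀ (l : List Char) (i : Nat) (st : List Nat) (m : List Int),
    ((bmGo l i st m).2).length = m.length := by
  intro l
  induction l with
  | nil => intro i st m; rfl
  | cons c l ih =>
    intro i st m
    unfold bmGo
    split_ifs with h1 h2
    · exact ih _ _ _
    · cases st with
      | nil => exact ih _ _ _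
      | cons jj rest => rw [ih]; simp
    · exact ih _ _ _

lemma closeRel_cons (c : Char) (l : List Char) (d : Nat) :
    closeRel (c :: l) d =
      (if c = '{' then (closeRel l (d + 1)).map (· + 1)
       else if c = '}' then
         (if d = 1 then some 0 else (closeRel l (d - 1)).map (· + 1))
       else (closeRel l d).map (· + 1)) := rfl

lemma bmGo_stack :
    ∀ (l : List Char) (i : Nat) (st : List Nat) (m : List Int) (r j : Nat),
    (∀ x ∈ st, x < i) → st.Pairwise (· > ·) → st[r]? = some j → j < m.length →
    ((bmGo l i st m).2).getD j (-1) =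
      match closeRel l (r + 1) with
      | some off => ((i + off : Nat) : Int)
      | none => m.getD j (-1) := by
  intro l
  induction l with
  | nil => intro i st m r j _ _ _ _; rfl
  | cons c l ih =>
    intro i st m r j hlt hpw hr hjm
    rw [bmGo_cons, closeRel_cons]
    by_cases h1 : c = '{'
    · simp only [if_pos h1]
      have hih := ih (i+1) (i :: st) m (r+1) j
        (by intro x hx; rcases List.mem_cons.1 hx with h|h; omega; exact lt_trans (hlt x h) (by omega))
        (List.pairwise_cons.2 ⟨fun x hx => hlt x hx, hpw⟩)
        (by simpa using hr) hjm
      rcases hcr : closeRel l (r + 1 + 1) with _ | off <;>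
        simp only [hcr, Option.map_none, Option.map_some] at hih ⊢ <;> rw [hih]
      push_cast; ring
    · by_cases h2 : c = '}'
      · simp only [if_neg h1, if_pos h2]
        cases st with
        | nil => simp at hr
        | cons jj rest =>
          have hjjlt : ∀ x ∈ rest, jj > x := (List.pairwise_cons.1 hpw).1
          cases r with
          | zero =>
            have hj : jj = j := by simpa using hr
            subst hj
            have hnotin : jj ∉ rest := fun hm => by have := hjjlt jj hm; omega
            
            rw [bmGo_snd_getD_of_notin (-1) l (i+1) rest (m.set jj i) jj hnotin
              (by have := hlt jj List.mem_cons_self; omega)]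
            simp [List.getD, hjm]
          | succ r' =>
            have hr' : rest[r']? = some j := by simpa using hr
            have hrne : ¬ r' + 1 + 1 = 1 := by omega
            simp only [if_neg hrne]
            have hne : jj ≠ j := fun he => by
              have h1 := hjjlt j (List.mem_of_getElem? hr'); omega
            have hih := ih (i+1) rest (m.set jj i) r' j
              (by intro x hx; exact lt_trans (hlt x (List.mem_cons_of_mem _ hx)) (by omega))
              (List.Pairwise.of_cons hpw) hr' (by simpa using hjm)
            have hset : (m.set jj (i : Int)).getD j (-1) = m.getD j (-1) := by
              simp [List.getD, List.getElem?_set_ne hne]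
            rw [hset] at hih
            have harr : r' + 1 + 1 - 1 = r' + 1 := by omega
            rw [harr]
            rcases hcr : closeRel l (r' + 1) with _ | off <;>
              simp only [hcr, Option.map_none, Option.map_some] at hih ⊢ <;> rw [hih]
            push_cast; ring
      · simp only [if_neg h1, if_neg h2]
        have hih := ih (i+1) st m r j (by intro x hx; exact lt_trans (hlt x hx) (by omega)) hpw hr hjm
        rcases hcr : closeRel l (r + 1) with _ | off <;>
          simp only [hcr, Option.map_none, Option.map_some] at hih ⊢ <;> rw [hih]
        push_cast; ring

lemma buildMatch_getD (s : List Char) (j : Nat) (h : s[j]? = some '{') :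
    (buildMatch s).getD j (-1) =
      match closeRel (s.drop (j + 1)) 1 with
      | some off => ((j + 1 + off : Nat) : Int)
      | none => -1 := by
  have hj : j < s.length := by
    by_contra hc
    rw [List.getElem?_eq_none (by omega)] at h
    simp at h
  have hgetc : s[j] = '{' := by simpa [List.getElem?_eq_getElem hj] using h
  unfold buildMatch
  set m0 := List.replicate s.length (-1 : Int) with hm0
  have hm0len : m0.length = s.length := by simp [hm0]
  have hm0j : m0.getD j (-1) = -1 := by simp [hm0, List.getD, hj]
  clear_value m0
  have htklen : (s.take j).length = j := by simp [List.length_take, le_of_lt hj]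
  set pre := bmGo (s.take j) 0 [] m0 with hpre
  have hinv := bmGo_fst_inv (s.take j) 0 [] m0 (by simp) (by simp)
  rw [htklen] at hinv
  have hst1 : ∀ x ∈ pre.1, x < j := by simpa using hinv.1
  have hpw : pre.1.Pairwise (· > ·) := hinv.2
  have hm1len : pre.2.length = m0.length := by rw [hpre, bmGo_snd_length]
  have hm1j : pre.2.getD j (-1) = -1 := by
    rw [hpre, bmGo_snd_getD_of_ge (-1) _ 0 _ _ j (by simp) (by simp [htklen])]
    exact hm0j
  have hrun : bmGo s 0 [] m0 = bmGo (s.drop (j+1)) (j+1) (j :: pre.1) pre.2 := by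
    conv_lhs => rw [← List.take_append_drop j s]
    rw [bmGo_append, htklen, Nat.zero_add]
    rw [← List.getElem_cons_drop hj, hgetc, bmGo_cons, if_pos rfl]
  rw [hrun]
  have := bmGo_stack (s.drop (j+1)) (j+1) (j :: pre.1) pre.2 0 j
    (by intro x hx; rcases List.mem_cons.1 hx with hh|hh; omega; exact lt_trans (hst1 x hh) (by omega))
    (List.pairwise_cons.2 ⟨fun x hx => hst1 x hx, hpw⟩)
    (by simp) (by omega)
  rw [this, hm1j]

lemma mapShift (X : Option Nat) (i start : Nat) (s : List Char) :
    (match X.map (· + 1) with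
     | some off => (some (PySem.List.slice s (some (start : Int)) (some (((i + off : Nat) : Int) + 1))), i + off + 1)
     | none => ((none : Option (List Char)), start))
    = (match X with
       | some off => (some (PySem.List.slice s (some (start : Int)) (some ((((i + 1) + off : Nat) : Int) + 1))), (i + 1) + off + 1)
       | none => (none, start)) := by
  rcases X with _ | off
  · rfl
  · simp only [Option.map_some]
    rw [show i + (off + 1) = i + 1 + off from by omega]

lemma pbgLoop_eq (s : List Char) (start : Nat) :
    ∀ (n i : Nat) (d : Int), s.length - i ≤ n → 1 ≤ d →
    pbgLoop s start i d =
      match closeRel (s.drop i) d.toNat with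
      | some off =>
          (some (PySem.List.slice s (some (start : Int)) (some (((i + off : Nat) : Int) + 1))),
           i + off + 1)
      | none => (none, start) := by
  intro n
  induction n with
  | zero =>
    intro i d hn hd
    have hge : ¬ i < s.length := by omega
    rw [pbgLoop, dif_neg hge, List.drop_eq_nil_of_le (by omega)]
    rfl
  | succ n ih =>
    intro i d hn hd
    by_cases hi : i < s.length
    · rw [← List.getElem_cons_drop hi, closeRel_cons]
      rw [pbgLoop, dif_pos hi]
      by_cases h1 : s[i] = '{'
      · simp only [if_pos h1]
        have hih := ih (i+1) (d+1) (by omega) (by omega)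
        rw [show (d + 1 : Int).toNat = d.toNat + 1 from by omega] at hih
        rw [mapShift]; exact hih
      · simp only [if_neg h1]
        by_cases h2 : s[i] = '}'
        · simp only [if_pos h2]
          by_cases h3 : d - 1 = 0
          · simp only [if_pos h3, show d.toNat = 1 from by omega]
            simp
          · simp only [if_neg h3, if_neg (show ¬ d.toNat = 1 from by omega)]
            have hih := ih (i+1) (d-1) (by omega) (by omega)
            rw [show (d - 1 : Int).toNat = d.toNat - 1 from by omega] at hih
            rw [mapShift]; exact hih
        · simp only [if_neg h2]
          rw [mapShift]
          exact ih (i+1) d (by omega) hd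
    · rw [pbgLoop, dif_neg hi, List.drop_eq_nil_of_le (by omega)]
      rfl

lemma group_eq (s : List Char) (j : Nat) (h : s[j]? = some '{') :
    parseBraceGroup s j =
      (if (buildMatch s).getD j (-1) < 0 then (none, j)
       else (some (PySem.List.slice s (some (j : Int)) (some ((buildMatch s).getD j (-1) + 1))),
             ((buildMatch s).getD j (-1) + 1).toNat)) := by
  have hj : j < s.length := by
    by_contra hc
    rw [List.getElem?_eq_none (by omega)] at h
    simp at h
  have hget : s[j] = '{' := by simpa [List.getElem?_eq_getElem hj] using h
  have hgetD : s.getD j ' ' = '{' := by simp [List.getD, List.getElem?_eq_getElem hj, hget]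
  unfold parseBraceGroup
  rw [if_neg (by push Not; exact ⟨by omega, by rw [hgetD]⟩)]
  rw [pbgLoop, dif_pos hj, if_pos hget]
  rw [pbgLoop_eq s j s.length (j+1) (0+1) (by omega) (by omega)]
  rw [buildMatch_getD s j h]
  rcases hcr : closeRel (s.drop (j+1)) ((0 + 1 : Int)).toNat with _ | off
  · rw [show ((0 + 1 : Int)).toNat = 1 from rfl] at hcr
    simp [hcr]
  · rw [show ((0 + 1 : Int)).toNat = 1 from rfl] at hcr
    simp only [hcr]
    have hnn : ¬ ((j + 1 + off : Nat) : Int) < 0 := by omega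
    have htn : (((j + 1 + off : Nat) : Int) + 1).toNat = j + 1 + off + 1 := by omega
    rw [if_neg hnn, htn]


lemma getD_brace (s : List Char) (p : Nat) (h1 : p < s.length) (h2 : s.getD p ' ' = '{') :
    s[p]? = some '{' := by
  rw [List.getElem?_eq_getElem h1, ← List.getD_eq_getElem s ' ' h1, h2]

lemma loop_eq (s : List Char) :
    ∀ (fuel i : Nat) (out : List (List Char)) (reps : Int) (warns : List String),
    convGoA s fuel i out reps warns = convGoB s (buildMatch s) fuel i out reps warns := by
  intro fuel
  induction fuel with
  | zero => intro i out reps warns; rfl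
  | succ fuel ih =>
    intro i out reps warns
    rw [convGoA, convGoB]
    by_cases hi : i < s.length
    · simp only [if_pos hi]
      by_cases hs : PySem.Chars.startswith (s.drop i) pvTf = true
      · simp only [if_pos hs]
        by_cases ha : i + 3 < s.length ∧ (PySem.Chars.isalnum (s.getD (i + 3) ' ') = true ∨ s.getD (i + 3) ' ' = '_')
        · simp only [if_pos ha]; exact ih _ _ _ _
        · simp only [if_neg ha]
          by_cases hb : skipWS s (i + 3) ≥ s.length ∨ ¬ s.getD (skipWS s (i + 3)) ' ' = '{'
          · simp only [if_pos hb]; exact ih _ _ _ _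
          · simp only [if_neg hb]
            push Not at hb
            have hj1 : s[skipWS s (i + 3)]? = some '{' := getD_brace s _ hb.1 hb.2
            rw [group_eq s _ hj1]
            by_cases he1 : (buildMatch s).getD (skipWS s (i + 3)) (-1) < 0
            · simp only [if_pos he1]; exact ih _ _ _ _
            · simp only [if_neg he1]
              by_cases hc : skipWS s ((buildMatch s).getD (skipWS s (i + 3)) (-1) + 1).toNat ≥ s.length ∨
                  ¬ s.getD (skipWS s ((buildMatch s).getD (skipWS s (i + 3)) (-1) + 1).toNat) ' ' = '{'
              · simp only [if_pos hc]; exact ih _ _ _ _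
              · simp only [if_neg hc]
                push Not at hc
                have hj2 : s[skipWS s ((buildMatch s).getD (skipWS s (i + 3)) (-1) + 1).toNat]? = some '{' :=
                  getD_brace s _ hc.1 hc.2
                rw [group_eq s _ hj2]
                by_cases he2 : (buildMatch s).getD (skipWS s ((buildMatch s).getD (skipWS s (i + 3)) (-1) + 1).toNat) (-1) < 0
                · simp only [if_pos he2]; exact ih _ _ _ _
                · simp only [if_neg he2]; exact ih _ _ _ _
      · simp only [if_neg hs]; exact ih _ _ _ _
    · simp only [if_neg hi]

-- ===== VERDICT (by name: the statement is the Claim_ definition above) =====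
theorem convert_tf_to_frac_spec : Claim_equal_convert_tf_to_frac := by
  intro text _
  unfold Spec_convert_tf_to_frac convert_tf_to_frac convert_tf_to_frac_alt
  simp only [loop_eq]
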